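-- pv_equiv track=rewrite | github.com/SLEEPWALKERG/SVAG | val/model.py | metric_acc
-- ===== SOURCE A (Python) =====
-- from copy import deepcopy
--
-- def metric_acc(predict, ground_truth):
--     cnt = 0
--     for idx, each in enumerate(predict):
--         lst_predict = []
--         for val in each.split(' | '):
--             if val != ' ' and val != '':
--                 lst_predict.append(val)
--         lst_predict.sort()
--         lst_ground_truth = deepcopy(ground_truth[idx])
--         lst_ground_truth.sort()
--         if lst_predict == lst_ground_truth:
--             cnt += 1
--     return cnt
-- ===== SOURCE B (Python) =====
-- def metric_acc(predict, ground_truth):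
--     cnt = 0
--     for pred, gold in zip(predict, ground_truth):
--         remaining = list(gold)
--         ok = True
--         for tok in pred.split(' | '):
--             if tok == ' ' or tok == '':
--                 continue
--             if tok in remaining:
--                 remaining.remove(tok)
--             else:
--                 ok = False
--                 break
--         if ok and not remaining:
--             cnt += 1
--     return cnt
-- ===== Notes on version B (the rewrite author's own statement) =====
-- stated objective: alternative
-- what changed: Replaces A's index-driven sort-both-then-compare (with deepcopy) by an element-cancellation check: walking the prediction tokens and removing each from a working copy of the gold list, succeeding iff every removal succeeds and the copy empties; no sorting anywhere.
import Mathlib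
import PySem

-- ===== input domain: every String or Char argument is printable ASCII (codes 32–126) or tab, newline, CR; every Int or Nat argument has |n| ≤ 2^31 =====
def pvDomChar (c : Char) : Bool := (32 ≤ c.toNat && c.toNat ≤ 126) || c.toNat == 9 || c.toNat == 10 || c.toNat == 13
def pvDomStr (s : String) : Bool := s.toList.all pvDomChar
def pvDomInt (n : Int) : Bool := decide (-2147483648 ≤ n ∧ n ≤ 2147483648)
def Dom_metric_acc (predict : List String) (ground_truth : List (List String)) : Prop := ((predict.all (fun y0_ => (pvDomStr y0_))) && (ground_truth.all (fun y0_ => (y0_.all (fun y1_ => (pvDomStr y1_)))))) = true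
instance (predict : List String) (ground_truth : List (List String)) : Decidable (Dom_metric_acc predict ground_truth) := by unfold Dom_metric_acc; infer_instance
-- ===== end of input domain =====

-- B replaces A's sort-both-then-compare (with deepcopy) by element cancellation:
-- remove each prediction token from a working copy of the gold list and succeed iff
-- the copy empties — a different multiset-equality algorithm, no sorting.
-- ===== PORT A =====
def metric_acc (predict : List String) (ground_truth : List (List String)) : Int :=
  (PySem.List.enumerate predict 0).foldl (fun cnt ie =>
    -- each.split(' | '): the separator is non-empty, so split? is always some
    let lst_predict :=
      ((PySem.Str.split? ie.2 " | ").getD []).foldl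
        (fun acc val => if val != " " && val != "" then acc ++ [val] else acc) []
    let lst_predict := PySem.List.sorted lst_predict (fun x => x) false
    -- ground_truth[idx]: in range exactly under Pre_metric_acc (else Python raises IndexError)
    let lst_ground_truth := PySem.List.pyGetD ground_truth ie.1 []
    let lst_ground_truth := PySem.List.sorted lst_ground_truth (fun x => x) false
    if lst_predict = lst_ground_truth then cnt + 1 else cnt) 0

-- ===== PORT B =====
-- B's inner token loop with its break: some remaining = loop left with ok = True,
-- none = ok became False ('tok in remaining' then 'remaining.remove(tok)' = guarded erase).
def pvCancel : List String → List String → Option (List String)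
  | [], remaining => some remaining
  | tok :: ts, remaining =>
    if tok == " " || tok == "" then pvCancel ts remaining
    else if remaining.contains tok then pvCancel ts (remaining.erase tok)
    else none

-- B's outer loop over zip(predict, ground_truth) with the counter accumulator.
def pvGo : List (String × List String) → Int → Int
  | [], cnt => cnt
  | pg :: rest, cnt =>
      pvGo rest
        (if pvCancel ((PySem.Str.split? pg.1 " | ").getD []) pg.2 = some [] then cnt + 1 else cnt)

def metric_acc_alt (predict : List String) (ground_truth : List (List String)) : Int :=
  pvGo (predict.zip ground_truth) 0

-- ===== PRECONDITION & SPEC =====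
-- Pre_ excludes exactly the inputs where A raises IndexError on ground_truth[idx].
def Pre_metric_acc (predict : List String) (ground_truth : List (List String)) : Prop :=
  predict.length ≤ ground_truth.length
instance (predict : List String) (ground_truth : List (List String)) : Decidable (Pre_metric_acc predict ground_truth) := by unfold Pre_metric_acc; infer_instance
def pvWitness_metric_acc : List String × List (List String) := (["a | b"], [["b", "a"]])

def Spec_metric_acc (predict : List String) (ground_truth : List (List String)) (out : Int) : Prop := out = metric_acc_alt predict ground_truth
instance (predict : List String) (ground_truth : List (List String)) (out : Int) : Decidable (Spec_metric_acc predict ground_truth out) := by unfold Spec_metric_acc; infer_instance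

-- ===== CLAIM (what is proved, stated in full; the proofs are below) =====
def Claim_equal_metric_acc : Prop := ∀ (predict : List String) (ground_truth : List (List String)), Dom_metric_acc predict ground_truth → Pre_metric_acc predict ground_truth → Spec_metric_acc predict ground_truth (metric_acc predict ground_truth)

-- ===== LEMMAS AND PROOFS =====

-- cancellation over an already-filtered token list
def pvCancelF : List String → List String → Option (List String)
  | [], remaining => some remaining
  | tok :: ts, remaining =>
    if remaining.contains tok then pvCancelF ts (remaining.erase tok) else none

lemma pvCancel_eq_filter (ts rem : List String) :
    pvCancel ts rem = pvCancelF (ts.filter (fun v => v != " " && v != "")) rem := by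
  induction ts generalizing rem with
  | nil => rfl
  | cons t ts ih =>
    by_cases h1 : t = " " ∨ t = ""
    · have : (t == " " || t == "") = true := by
        rcases h1 with h | h <;> simp [h]
      simp [pvCancel, this, List.filter_cons, ih]
      rcases h1 with h | h <;> simp [h, bne]
    · push Not at h1
      have hb : (t == " " || t == "") = false := by
        simp [h1.1, h1.2]
      have hf : (t != " " && t != "") = true := by
        simp [bne, h1.1, h1.2]
      simp [pvCancel, hb, hf, pvCancelF, ih]

-- cancellation succeeds with empty remainder exactly on multiset-equal lists
lemma pvCancelF_iff_perm (ts rem : List String) :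
    pvCancelF ts rem = some [] ↔ ts.Perm rem := by
  induction ts generalizing rem with
  | nil =>
    constructor
    · intro h
      have : rem = [] := by simpa [pvCancelF] using h
      simp [this]
    · intro h
      have : rem = [] := (List.Perm.nil_eq h).symm
      simp [pvCancelF, this]
  | cons t ts ih =>
    by_cases hm : t ∈ rem
    · have hc : rem.contains t = true := by simpa using hm
      rw [pvCancelF, if_pos hc, ih]
      exact ⟨fun h => (List.cons_perm_iff_perm_erase).mpr ⟨hm, h⟩,
            fun h => ((List.cons_perm_iff_perm_erase).mp h).2⟩
    · have hc : rem.contains t = false := by simpa using hm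
      rw [pvCancelF, if_neg (by simpa using hm)]
      constructor
      · intro h; cases h
      · intro h; exact absurd (h.mem_iff.mp List.mem_cons_self) hm

-- per pair: A's "sorted == sorted" test and B's cancellation test agree
lemma pv_pair (xs ys : List String) :
    (if (PySem.List.sorted xs (fun x => x) false == PySem.List.sorted ys (fun x => x) false)
     then (1 : Int) else 0)
    = (if pvCancelF xs ys = some [] then (1 : Int) else 0) := by
  simp only [beq_iff_eq]
  by_cases hp : xs.Perm ys
  · rw [if_pos ((PySem.List.sorted_id_eq_sorted_id_iff_perm xs ys).mpr hp),
       if_pos ((pvCancelF_iff_perm xs ys).mpr hp)]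
  · rw [if_neg (fun h => hp ((PySem.List.sorted_id_eq_sorted_id_iff_perm xs ys).mp h)),
       if_neg (fun h => hp ((pvCancelF_iff_perm xs ys).mp h))]

-- B's counting recursion as an accumulator plus a sum of indicators
lemma pvGo_eq_sum (l : List (String × List String)) (cnt : Int) :
    pvGo l cnt
      = cnt + (l.map (fun pg =>
          if pvCancel ((PySem.Str.split? pg.1 " | ").getD []) pg.2 = some []
          then (1 : Int) else 0)).sum := by
  induction l generalizing cnt with
  | nil => simp [pvGo]
  | cons pg rest ih =>
    rw [pvGo, ih]
    by_cases h : pvCancel ((PySem.Str.split? pg.1 " | ").getD []) pg.2 = some []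
    · simp [h]; ring
    · simp [h]

-- A's enumerate-indexed counting loop, rephrased over the zipped lists.
lemma pv_loop (f : String → List String → Bool) (dflt : List String) :
    ∀ (ps : List String) (pre gt : List (List String)) (cnt : Int),
      ps.length ≤ gt.length →
      (PySem.List.enumerate ps (pre.length : Int)).foldl
        (fun c ie => if f ie.2 (PySem.List.pyGetD (pre ++ gt) ie.1 dflt) then c + 1 else c) cnt
      = cnt + ((ps.zip gt).map (fun pg => if f pg.1 pg.2 then (1 : Int) else 0)).sum := by
  intro ps
  induction ps with
  | nil => intro pre gt cnt _; simp [PySem.List.enumerate]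
  | cons p ps ih =>
    intro pre gt cnt hlen
    cases gt with
    | nil => simp at hlen
    | cons g gt' =>
      rw [PySem.List.enumerate_cons, List.foldl_cons]
      have hget : PySem.List.pyGetD (pre ++ g :: gt') (pre.length : Int) dflt = g := by
        rw [PySem.List.pyGetD_natCast]
        simp [List.getD]
      rw [hget]
      have hstep : ((pre.length : Int) + 1) = ((pre ++ [g]).length : Int) := by
        push_cast [List.length_append, List.length_singleton]; ring
      have hassoc : pre ++ g :: gt' = (pre ++ [g]) ++ gt' := by simp
      rw [hstep, hassoc, ih (pre ++ [g]) gt' (if f p g then cnt + 1 else cnt) (by simpa using hlen)]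
      simp only [List.zip_cons_cons, List.map_cons, List.sum_cons]
      by_cases hf : f p g
      · simp [hf]; ring
      · simp [hf]

-- ===== VERDICT (by name: the statement is the Claim_ definition above) =====
theorem metric_acc_spec : Claim_equal_metric_acc := by
  intro predict ground_truth _ hpre
  unfold Spec_metric_acc metric_acc metric_acc_alt
  have hbody : ∀ (cnt : Int) (ie : Int × String),
      (let lst_predict :=
        ((PySem.Str.split? ie.2 " | ").getD []).foldl
          (fun acc val => if val != " " && val != "" then acc ++ [val] else acc) []
       let lst_predict := PySem.List.sorted lst_predict (fun x => x) false
       let lst_ground_truth := PySem.List.pyGetD ground_truth ie.1 []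
       let lst_ground_truth := PySem.List.sorted lst_ground_truth (fun x => x) false
       if lst_predict = lst_ground_truth then cnt + 1 else cnt)
      = (if (fun p g =>
              PySem.List.sorted (((PySem.Str.split? p " | ").getD []).filter
                  (fun v => v != " " && v != "")) (fun x => x) false
              == PySem.List.sorted g (fun x => x) false) ie.2
            (PySem.List.pyGetD ground_truth ie.1 []) then cnt + 1 else cnt) := by
    intro cnt ie
    simp only [PySem.List.foldl_append_if_eq_filter, List.nil_append, beq_iff_eq]
  simp only [hbody]
  have h0 : (PySem.List.enumerate predict 0)
      = PySem.List.enumerate predict (([] : List (List String)).length : Int) := by simp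
  have hgt : ground_truth = ([] : List (List String)) ++ ground_truth := rfl
  rw [h0]
  conv_lhs => rw [hgt]
  rw [pv_loop (fun p g =>
        PySem.List.sorted (((PySem.Str.split? p " | ").getD []).filter
            (fun v => v != " " && v != "")) (fun x => x) false
        == PySem.List.sorted g (fun x => x) false) [] predict [] ground_truth 0 hpre]
  rw [zero_add, pvGo_eq_sum, zero_add]
  refine congrArg List.sum (List.map_congr_left fun pg _ => ?_)
  rw [pvCancel_eq_filter]
  exact pv_pair (((PySem.Str.split? pg.1 " | ").getD []).filter (fun v => v != " " && v != "")) pg.2
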